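-- pv_equiv track=rewrite | github.com/posl/comment_recommendation | script/mod_gen/5_time/zh/267_B/4.py | split_pins
-- ===== SOURCE A (Python) =====
-- def split_pins(bowl):
--     bowl = list(bowl)
--     for i in range(10):
--         bowl[i] = int(bowl[i])
--     for i in range(10):
--         if bowl[i] == 0:
--             bowl[i] = 1
--             break
--     for i in range(10):
--         if bowl[i] == 1:
--             bowl[i] = 0
--             break
--     for i in range(10):
--         if bowl[i] == 1:
--             bowl[i] = 0
--             break
--     for i in range(10):
--         if bowl[i] == 1:
--             bowl[i] = 0
--             break
--     for i in range(10):
--         if bowl[i] == 1: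
--             bowl[i] = 0
--             break
--     for i in range(10):
--         if bowl[i] == 1:
--             bowl[i] = 0
--             break
--     for i in range(10):
--         if bowl[i] == 1:
--             bowl[i] = 0
--             break
--     for i in range(10):
--         if bowl[i] == 1:
--             bowl[i] = 0
--             break
--     for i in range(10):
--         if bowl[i] == 1:
--             bowl[i] = 0
--             break
--     for i in range(10):
--         if bowl[i] == 1:
--             return "Yes"
--     return "No"
-- ===== SOURCE B (Python) =====
-- def split_pins(bowl):
--     first = [int(bowl[i]) for i in range(10)]
--     effective = first.count(1) + (1 if 0 in first else 0)
--     return "Yes" if effective >= 9 else "No"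
-- ===== Notes on version B (the rewrite author's own statement) =====
-- stated objective: simpler
-- what changed: Replaces A's nine sequential scan-with-break loops (flip first 0 to 1, then eight passes each zeroing the first 1, then a final scan) with a direct closed form: count the 1s among the first ten pins, add 1 if any pin is 0, and answer Yes iff that total is at least 9.
import Mathlib
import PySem

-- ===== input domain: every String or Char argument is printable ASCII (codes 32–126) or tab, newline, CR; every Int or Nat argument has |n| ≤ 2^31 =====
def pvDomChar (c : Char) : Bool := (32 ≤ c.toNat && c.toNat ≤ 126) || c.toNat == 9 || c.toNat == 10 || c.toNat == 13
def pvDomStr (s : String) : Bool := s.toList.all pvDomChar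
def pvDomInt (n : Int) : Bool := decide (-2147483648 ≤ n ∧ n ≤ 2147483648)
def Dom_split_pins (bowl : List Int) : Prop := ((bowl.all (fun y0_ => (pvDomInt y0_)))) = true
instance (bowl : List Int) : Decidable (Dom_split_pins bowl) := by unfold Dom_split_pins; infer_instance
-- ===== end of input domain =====

-- B replaces A's nine sequential scan-and-break loops over the pin array with a single
-- count of 1s and a 0-membership test on the first ten elements (objective: simpler).

-- ===== PORT A =====
-- 'for i in range(10): if bowl[i] == tgt: bowl[i] = new; break' — fuel-limited scan that
-- rewrites the first occurrence of tgt among the first 10 entries (in range under Pre_).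
def pinStep (tgt new : Int) : Nat → List Int → List Int
  | _, [] => []
  | 0, l => l
  | n+1, x :: xs => if x = tgt then new :: xs else x :: pinStep tgt new n xs

-- 'for i in range(10): if bowl[i] == 1: return "Yes"'
def hasOne : Nat → List Int → Bool
  | _, [] => false
  | 0, _ => false
  | n+1, x :: xs => if x = 1 then true else hasOne n xs

def split_pins (bowl : List Int) : String :=
  -- 'bowl = list(bowl)' copies; the int() conversion loop is the identity on ints
  -- (it raises IndexError iff the list has fewer than 10 elements — excluded by Pre_)
  let b1 := pinStep 0 1 10 bowl
  let b2 := pinStep 1 0 10 b1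
  let b3 := pinStep 1 0 10 b2
  let b4 := pinStep 1 0 10 b3
  let b5 := pinStep 1 0 10 b4
  let b6 := pinStep 1 0 10 b5
  let b7 := pinStep 1 0 10 b6
  let b8 := pinStep 1 0 10 b7
  let b9 := pinStep 1 0 10 b8
  if hasOne 10 b9 then "Yes" else "No"

-- ===== PORT B =====
def split_pins_alt (bowl : List Int) : String :=
  -- 'first = [int(bowl[i]) for i in range(10)]' (getD's default is unreachable under Pre_)
  let first := (List.range 10).map (fun i => bowl.getD i 0)
  let effective := first.count 1 + (if 0 ∈ first then 1 else 0)
  if 9 ≤ effective then "Yes" else "No"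

-- ===== PRECONDITION & SPEC =====
-- Python A raises IndexError on lists shorter than 10; exactly those are excluded.
def Pre_split_pins (bowl : List Int) : Prop := 10 ≤ bowl.length
instance (bowl : List Int) : Decidable (Pre_split_pins bowl) := by unfold Pre_split_pins; infer_instance
def pvWitness_split_pins : List Int := [1, 1, 0, 1, 1, 1, 2, 1, 1, 1]

def Spec_split_pins (bowl : List Int) (out : String) : Prop := out = split_pins_alt bowl
instance (bowl : List Int) (out : String) : Decidable (Spec_split_pins bowl out) := by unfold Spec_split_pins; infer_instance

-- ===== CLAIM (what is proved, stated in full; the proofs are below) =====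
def Claim_equal_split_pins : Prop := ∀ (bowl : List Int), Dom_split_pins bowl → Pre_split_pins bowl → Spec_split_pins bowl (split_pins bowl)

-- ===== LEMMAS AND PROOFS =====

theorem pinStep_length (tgt new : Int) : ∀ (n : Nat) (l : List Int),
    (pinStep tgt new n l).length = l.length := by
  intro n l
  induction l generalizing n with
  | nil => cases n <;> simp [pinStep]
  | cons x xs ih =>
    cases n with
    | zero => simp [pinStep]
    | succ n => by_cases h : x = tgt <;> simp [pinStep, h, ih]

theorem pinStep_split (tgt new : Int) : ∀ (n : Nat) (l : List Int),
    pinStep tgt new n l = pinStep tgt new n (l.take n) ++ l.drop n := by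
  intro n l
  induction l generalizing n with
  | nil => cases n <;> simp [pinStep]
  | cons x xs ih =>
    cases n with
    | zero => simp [pinStep]
    | succ n => by_cases h : x = tgt <;> simp [pinStep, h, ih]

theorem hasOne_take : ∀ (n : Nat) (l : List Int),
    hasOne n l = decide ((1 : Int) ∈ l.take n) := by
  intro n l
  induction l generalizing n with
  | nil => cases n <;> simp [hasOne]
  | cons x xs ih =>
    cases n with
    | zero => simp [hasOne]
    | succ n =>
      by_cases h : x = 1
      · simp [hasOne, h]
      · simp [hasOne, h, ih]
        exact fun he => absurd he.symm h

theorem count_pinStep_zero : ∀ (n : Nat) (l : List Int), l.length ≤ n →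
    (pinStep 0 1 n l).count 1 = l.count 1 + (if (0 : Int) ∈ l then 1 else 0) := by
  intro n l
  induction l generalizing n with
  | nil => intro _; cases n <;> simp [pinStep]
  | cons x xs ih =>
    intro hlen
    cases n with
    | zero => simp at hlen
    | succ n =>
      by_cases h : x = 0
      · subst h; simp [pinStep]
      · have ih' := ih n (by simpa using hlen)
        have hmem : ((0 : Int) ∈ x :: xs) ↔ (0 : Int) ∈ xs := by
          simp [List.mem_cons]
          exact fun he => absurd he.symm h
        rw [show pinStep 0 1 (n+1) (x :: xs) = x :: pinStep 0 1 n xs from by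
          simp [pinStep, h]]
        rw [List.count_cons, List.count_cons, ih']
        simp only [hmem]
        split_ifs <;> omega

theorem count_pinStep_one : ∀ (n : Nat) (l : List Int), l.length ≤ n →
    (pinStep 1 0 n l).count 1 = l.count 1 - 1 := by
  intro n l
  induction l generalizing n with
  | nil => intro _; cases n <;> simp [pinStep]
  | cons x xs ih =>
    intro hlen
    cases n with
    | zero => simp at hlen
    | succ n =>
      by_cases h : x = 1
      · subst h; simp [pinStep]
      · have ih' := ih n (by simpa using hlen)
        simp [pinStep, h, ih']

theorem map_range_getD : ∀ (n : Nat) (l : List Int), n ≤ l.length →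
    (List.range n).map (fun i => l.getD i 0) = l.take n := by
  intro n
  induction n with
  | zero => intro l _; simp
  | succ n ih =>
    intro l hl
    have hn : n < l.length := by omega
    rw [List.range_succ, List.map_append, ih l (by omega), List.take_add_one]
    simp [List.getD, hn]

-- ===== VERDICT (by name: the statement is the Claim_ definition above) =====
theorem split_pins_spec : Claim_equal_split_pins := by
  intro bowl _ hpre
  unfold Spec_split_pins
  simp only [split_pins, split_pins_alt]
  have hpre' : (10 : Nat) ≤ bowl.length := hpre
  set t := bowl.take 10 with ht
  have htlen : t.length = 10 := by simp [ht]; omega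
  have hfirst : (List.range 10).map (fun i => bowl.getD i 0) = t :=
    map_range_getD 10 bowl hpre'
  -- reduce A's chain to the 10-element prefix
  have key : ∀ (u : List Int), u.length = 10 →
      (pinStep 1 0 10 (u ++ bowl.drop 10)).take 10 = pinStep 1 0 10 u ∧
      (pinStep 1 0 10 (u ++ bowl.drop 10)) = pinStep 1 0 10 u ++ bowl.drop 10 := by
    intro u hu
    have h1 : (u ++ bowl.drop 10).take 10 = u := by
      rw [List.take_append_of_le_length (by omega)]; simp [List.take_of_length_le, hu]
    have h2 : (u ++ bowl.drop 10).drop 10 = bowl.drop 10 := by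
      rw [List.drop_append_of_le_length (by omega)]; simp [List.drop_of_length_le, hu]
    have := pinStep_split 1 0 10 (u ++ bowl.drop 10)
    rw [h1, h2] at this
    refine ⟨?_, this⟩
    rw [this, List.take_append_of_le_length (by rw [pinStep_length]; omega)]
    simp [List.take_of_length_le, pinStep_length, hu]
  have hsplit0 : pinStep 0 1 10 bowl = pinStep 0 1 10 t ++ bowl.drop 10 := by
    have := pinStep_split 0 1 10 bowl; rwa [← ht] at this
  set u1 := pinStep 0 1 10 t with hu1
  have hu1len : u1.length = 10 := by rw [hu1, pinStep_length, htlen]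
  set u2 := pinStep 1 0 10 u1 with hu2def
  set u3 := pinStep 1 0 10 u2 with hu3def
  set u4 := pinStep 1 0 10 u3 with hu4def
  set u5 := pinStep 1 0 10 u4 with hu5def
  set u6 := pinStep 1 0 10 u5 with hu6def
  set u7 := pinStep 1 0 10 u6 with hu7def
  set u8 := pinStep 1 0 10 u7 with hu8def
  set u9 := pinStep 1 0 10 u8 with hu9def
  have hu2len : u2.length = 10 := by rw [hu2def, pinStep_length, hu1len]
  have hu3len : u3.length = 10 := by rw [hu3def, pinStep_length, hu2len]
  have hu4len : u4.length = 10 := by rw [hu4def, pinStep_length, hu3len]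
  have hu5len : u5.length = 10 := by rw [hu5def, pinStep_length, hu4len]
  have hu6len : u6.length = 10 := by rw [hu6def, pinStep_length, hu5len]
  have hu7len : u7.length = 10 := by rw [hu7def, pinStep_length, hu6len]
  have hu8len : u8.length = 10 := by rw [hu8def, pinStep_length, hu7len]
  have hu9len : u9.length = 10 := by rw [hu9def, pinStep_length, hu8len]
  have chain : pinStep 1 0 10 (pinStep 1 0 10 (pinStep 1 0 10 (pinStep 1 0 10
      (pinStep 1 0 10 (pinStep 1 0 10 (pinStep 1 0 10 (pinStep 1 0 10
      (pinStep 0 1 10 bowl)))))))) = u9 ++ bowl.drop 10 := by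
    rw [hsplit0,
      (key u1 hu1len).2, ← hu2def, (key u2 hu2len).2, ← hu3def,
      (key u3 hu3len).2, ← hu4def, (key u4 hu4len).2, ← hu5def,
      (key u5 hu5len).2, ← hu6def, (key u6 hu6len).2, ← hu7def,
      (key u7 hu7len).2, ← hu8def, (key u8 hu8len).2, ← hu9def]
  rw [chain, hfirst, hasOne_take, List.take_append_of_le_length (by omega),
    List.take_of_length_le (by omega)]
  -- counts
  have hc1 : u1.count 1 = t.count 1 + (if (0 : Int) ∈ t then 1 else 0) :=
    count_pinStep_zero 10 t (by omega)
  have hc2 : u2.count 1 = u1.count 1 - 1 := count_pinStep_one 10 u1 (by omega)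
  have hc3 : u3.count 1 = u2.count 1 - 1 := count_pinStep_one 10 u2 (by omega)
  have hc4 : u4.count 1 = u3.count 1 - 1 := count_pinStep_one 10 u3 (by omega)
  have hc5 : u5.count 1 = u4.count 1 - 1 := count_pinStep_one 10 u4 (by omega)
  have hc6 : u6.count 1 = u5.count 1 - 1 := count_pinStep_one 10 u5 (by omega)
  have hc7 : u7.count 1 = u6.count 1 - 1 := count_pinStep_one 10 u6 (by omega)
  have hc8 : u8.count 1 = u7.count 1 - 1 := count_pinStep_one 10 u7 (by omega)
  have hc9 : u9.count 1 = u8.count 1 - 1 := count_pinStep_one 10 u8 (by omega)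
  have hmem : ((1 : Int) ∈ u9) ↔ 0 < u9.count 1 := (List.count_pos_iff).symm
  have hct : t.count 1 ≤ t.length := List.count_le_length
  rw [htlen] at hct
  by_cases hz : (0 : Int) ∈ t
  · rw [if_pos hz] at hc1 ⊢
    by_cases hfin : (1 : Int) ∈ u9
    · have h0 : 0 < u9.count 1 := hmem.mp hfin
      have h9 : 9 ≤ t.count 1 + 1 := by omega
      simp [hfin, h9]
    · have h0 : u9.count 1 = 0 := by
        by_contra h; exact hfin (hmem.mpr (Nat.pos_of_ne_zero h))
      have h9 : ¬ 9 ≤ t.count 1 + 1 := by omega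
      simp [hfin, h9]
  · rw [if_neg hz] at hc1 ⊢
    by_cases hfin : (1 : Int) ∈ u9
    · have h0 : 0 < u9.count 1 := hmem.mp hfin
      have h9 : 9 ≤ t.count 1 := by omega
      simp [hfin, h9]
    · have h0 : u9.count 1 = 0 := by
        by_contra h; exact hfin (hmem.mpr (Nat.pos_of_ne_zero h))
      have h9 : ¬ 9 ≤ t.count 1 := by omega
      simp [hfin, h9]
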